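-- pv_equiv track=rewrite | github.com/nwingt/oice-server | modmod/operations/script_export_serializer.py | _print_dialog_text
-- ===== SOURCE A (Python) =====
-- def _print_dialog_text(dialog_text):
--     dialogs = dialog_text.strip().splitlines()
--
--     prev_dialog = None
--     script = ''
--     for dialog in dialogs:
--         if dialog:
--             if prev_dialog:
--                 script += "[r]\n"
--             script += dialog
--         prev_dialog = dialog
--
--     return script + "\n"
-- ===== SOURCE B (Python) =====
-- def _print_dialog_text(dialog_text):
--     lines = dialog_text.strip().splitlines()
--     runs = []
--     cur = []
--     for line in lines:
--         if line:
--             cur.append(line)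
--         elif cur:
--             runs.append(cur)
--             cur = []
--     if cur:
--         runs.append(cur)
--     return ''.join("[r]\n".join(run) for run in runs) + "\n"
-- ===== Notes on version B (the rewrite author's own statement) =====
-- stated objective: alternative
-- what changed: Replaces the prev-line truthiness flag and running string concatenation with a grouping pass that collects maximal runs of non-empty lines into lists, then joins each run with '[r]\n' and concatenates the runs.
import Mathlib
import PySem

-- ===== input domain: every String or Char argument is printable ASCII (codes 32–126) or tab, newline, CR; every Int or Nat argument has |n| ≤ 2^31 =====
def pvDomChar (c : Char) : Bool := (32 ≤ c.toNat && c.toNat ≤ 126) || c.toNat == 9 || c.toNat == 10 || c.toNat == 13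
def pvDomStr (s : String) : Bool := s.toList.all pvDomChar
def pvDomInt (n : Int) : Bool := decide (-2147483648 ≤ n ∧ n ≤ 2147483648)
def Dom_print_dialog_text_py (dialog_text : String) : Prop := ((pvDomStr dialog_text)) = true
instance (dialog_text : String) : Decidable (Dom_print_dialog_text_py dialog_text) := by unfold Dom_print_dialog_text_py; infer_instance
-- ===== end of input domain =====

-- B replaces A's prev-line flag and running string concatenation with a pass that
-- collects maximal runs of non-empty lines and joins each run with "[r]\n" (alternative decomposition, same cost).


-- ===== PORT A =====
-- Python truthiness of prev_dialog (None / '' are falsy)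
def pvTruthyA (o : Option String) : Bool :=
  match o with
  | none => false
  | some s => s != ""

-- the body of A's for-loop, state = (script, prev_dialog)
def pvStepA (st : String × Option String) (dialog : String) : String × Option String :=
  (if dialog ≠ "" then
     (if pvTruthyA st.2 then st.1 ++ "[r]\n" else st.1) ++ dialog
   else st.1,
   some dialog)

def print_dialog_text_py (dialog_text : String) : String :=
  let dialogs := PySem.Str.splitlines (PySem.Str.strip dialog_text)
  ((dialogs.foldl pvStepA ("", none)).1) ++ "\n"

-- ===== PORT B =====
-- the body of B's for-loop, state = (runs, cur)
def pvStepB (st : List (List String) × List String) (line : String) : List (List String) × List String :=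
  if line ≠ "" then (st.1, st.2 ++ [line])
  else if st.2 ≠ [] then (st.1 ++ [st.2], []) else st

def print_dialog_text_py_alt (dialog_text : String) : String :=
  let lines := PySem.Str.splitlines (PySem.Str.strip dialog_text)
  let st := lines.foldl pvStepB ([], [])
  let runs := if st.2 ≠ [] then st.1 ++ [st.2] else st.1
  PySem.Str.join "" (runs.map (fun run => PySem.Str.join "[r]\n" run)) ++ "\n"

-- ===== PRECONDITION & SPEC =====
def Spec_print_dialog_text_py (dialog_text : String) (out : String) : Prop := out = print_dialog_text_py_alt dialog_text
instance (dialog_text : String) (out : String) : Decidable (Spec_print_dialog_text_py dialog_text out) := by unfold Spec_print_dialog_text_py; infer_instance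

-- ===== CLAIM (what is proved, stated in full; the proofs are below) =====
def Claim_equal_print_dialog_text_py : Prop := ∀ (dialog_text : String), Dom_print_dialog_text_py dialog_text → Spec_print_dialog_text_py dialog_text (print_dialog_text_py dialog_text)

-- ===== LEMMAS AND PROOFS =====

-- how B renders a (runs, cur) state into a string
def pvRender (runs : List (List String)) (cur : List String) : String :=
  PySem.Str.join "" ((if cur ≠ [] then runs ++ [cur] else runs).map (fun run => PySem.Str.join "[r]\n" run))

theorem pv_join_nil (sep : String) : PySem.Str.join sep [] = "" := by
  rw [← String.toList_inj]
  simp [PySem.Str.toList_join, PySem.Chars.join_nil]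

theorem pv_join_singleton (sep a : String) : PySem.Str.join sep [a] = a := by
  rw [← String.toList_inj]
  simp [PySem.Str.toList_join, PySem.Chars.join_singleton]

theorem pv_join_cons_cons (sep p q : String) (rest : List String) :
    PySem.Str.join sep (p :: q :: rest) = p ++ sep ++ PySem.Str.join sep (q :: rest) := by
  rw [← String.toList_inj]
  simp [PySem.Str.toList_join, PySem.Chars.join_cons_cons, String.toList_append]

theorem pv_chars_join_nil_sep (parts : List (List Char)) :
    PySem.Chars.join [] parts = parts.flatten := by
  induction parts with
  | nil => simp [PySem.Chars.join_nil]
  | cons p rest ih =>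
    cases rest with
    | nil => simp [PySem.Chars.join_singleton]
    | cons q rs => simp [PySem.Chars.join_cons_cons, ih]

theorem pv_joinE_snoc (l : List String) (s : String) :
    PySem.Str.join "" (l ++ [s]) = PySem.Str.join "" l ++ s := by
  rw [← String.toList_inj]
  simp [PySem.Str.toList_join, pv_chars_join_nil_sep, String.toList_append]

theorem pv_J_snoc (cur : List String) (a : String) (h : cur ≠ []) :
    PySem.Str.join "[r]\n" (cur ++ [a]) = PySem.Str.join "[r]\n" cur ++ "[r]\n" ++ a := by
  induction cur with
  | nil => exact absurd rfl h
  | cons c cs ih =>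
    cases cs with
    | nil => simp [pv_join_cons_cons, pv_join_singleton]
    | cons d ds =>
      have : (d :: ds) ++ [a] = d :: (ds ++ [a]) := by simp
      calc PySem.Str.join "[r]\n" ((c :: d :: ds) ++ [a])
          = c ++ "[r]\n" ++ PySem.Str.join "[r]\n" ((d :: ds) ++ [a]) := by
            rw [List.cons_append, this, pv_join_cons_cons]
        _ = c ++ "[r]\n" ++ (PySem.Str.join "[r]\n" (d :: ds) ++ "[r]\n" ++ a) := by
            rw [ih (by simp)]
        _ = PySem.Str.join "[r]\n" (c :: d :: ds) ++ "[r]\n" ++ a := by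
            rw [pv_join_cons_cons]; simp [String.append_assoc]

-- rendering a state ignores whether cur has been flushed into runs
theorem pv_render_def (runs : List (List String)) (cur : List String) :
    pvRender runs cur
      = PySem.Str.join "" (runs.map (fun run => PySem.Str.join "[r]\n" run))
          ++ PySem.Str.join "[r]\n" cur := by
  unfold pvRender
  by_cases h : cur = []
  · subst h
    simp [PySem.Str.join, PySem.Chars.join_nil]
  · simp only [if_pos h, List.map_append, List.map_cons, List.map_nil, pv_joinE_snoc]

-- main invariant: A's running script equals the rendering of B's (runs, cur) state
theorem pv_inv (ls : List String) :
    ∀ (runs : List (List String)) (cur : List String) (prev : Option String) (script : String),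
      script = pvRender runs cur →
      pvTruthyA prev = decide (cur ≠ []) →
      (ls.foldl pvStepA (script, prev)).1
        = pvRender (ls.foldl pvStepB (runs, cur)).1 (ls.foldl pvStepB (runs, cur)).2 := by
  induction ls with
  | nil => intro runs cur prev script h1 _; simpa using h1
  | cons line rest ih =>
    intro runs cur prev script h1 h2
    simp only [List.foldl_cons]
    by_cases hl : line = ""
    · -- blank line: A appends nothing, prev becomes falsy; B flushes cur
      subst hl
      by_cases hc : cur = []
      · subst hc
        refine ih runs [] (some "") script h1 ?_
        simp [pvTruthyA]
      · have hA : pvStepA (script, prev) "" = (script, some "") := by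
          simp [pvStepA]
        have hB : pvStepB (runs, cur) "" = (runs ++ [cur], []) := by
          simp [pvStepB, hc]
        rw [hA, hB]
        refine ih (runs ++ [cur]) [] (some "") script ?_ ?_
        · rw [h1]; unfold pvRender; simp [hc]
        · simp [pvTruthyA]
    · -- non-empty line: A appends (maybe with separator); B extends cur
      have hA : pvStepA (script, prev) line
          = ((if pvTruthyA prev then script ++ "[r]\n" else script) ++ line, some line) := by
        simp [pvStepA, hl]
      have hB : pvStepB (runs, cur) line = (runs, cur ++ [line]) := by
        simp [pvStepB, hl]
      rw [hA, hB]
      refine ih runs (cur ++ [line]) (some line) _ ?_ ?_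
      · by_cases hc : cur = []
        · subst hc
          have hp : pvTruthyA prev = false := by simpa using h2
          rw [hp]
          rw [h1, pv_render_def, pv_render_def]
          simp [pv_join_singleton, pv_join_nil]
        · rw [if_pos (by rw [h2]; simp [hc])]
          rw [h1, pv_render_def, pv_render_def, pv_J_snoc cur line hc]
          simp [String.append_assoc]
      · simp [pvTruthyA, hl]

-- ===== VERDICT (by name: the statement is the Claim_ definition above) =====
theorem print_dialog_text_py_spec : Claim_equal_print_dialog_text_py := by
  intro dialog_text _
  have h := pv_inv (PySem.Str.splitlines (PySem.Str.strip dialog_text)) [] [] none ""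
    (by simp [pvRender, PySem.Str.join, PySem.Chars.join_nil]) (by simp [pvTruthyA])
  show (List.foldl pvStepA ("", none) (PySem.Str.splitlines (PySem.Str.strip dialog_text))).1 ++ "\n"
      = pvRender (List.foldl pvStepB ([], []) (PySem.Str.splitlines (PySem.Str.strip dialog_text))).1
          (List.foldl pvStepB ([], []) (PySem.Str.splitlines (PySem.Str.strip dialog_text))).2 ++ "\n"
  rw [h]
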